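-- pv_equiv track=rewrite | github.com/victrolahail593/Doramagic | packages/racekit/doramagic_racekit/race_workspace.py | _parse_worktree_blocks
-- ===== SOURCE A (Python) =====
-- from typing import Dict, List, Optional
--
-- def _parse_worktree_blocks(raw_text: str) -> List[Dict[str, str]]:
--     blocks = []
--     current: Dict[str, str] = {}
--     for line in raw_text.splitlines():
--         if not line.strip():
--             if current:
--                 blocks.append(current)
--                 current = {}
--             continue
--
--         key, _, value = line.partition(" ")
--         current[key] = value
--
--     if current:
--         blocks.append(current)
--     return blocks
-- ===== SOURCE B (Python) =====
-- # B: segment-then-map — split lines into maximal non-blank runs, map each run to a dict;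
-- # no stateful 'current' accumulator, no trailing flush.
-- def _parse_worktree_blocks(raw_text):
--     def go(lines):
--         if not lines:
--             return []
--         if not lines[0].strip():
--             return go(lines[1:])
--         i = 0
--         while i < len(lines) and lines[i].strip():
--             i += 1
--         d = {}
--         for line in lines[:i]:
--             key, _, value = line.partition(" ")
--             d[key] = value
--         return [d] + go(lines[i:])
--     return go(raw_text.splitlines())
-- ===== Notes on version B (the rewrite author's own statement) =====
-- stated objective: alternative
-- what changed: Replaces A's single stateful pass with a mutable accumulator dict and trailing flush by a segment-then-map decomposition: recursively skip blank lines, cut off the maximal non-blank run, turn that run into one dict, and recurse on the remainder.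
import Mathlib
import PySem

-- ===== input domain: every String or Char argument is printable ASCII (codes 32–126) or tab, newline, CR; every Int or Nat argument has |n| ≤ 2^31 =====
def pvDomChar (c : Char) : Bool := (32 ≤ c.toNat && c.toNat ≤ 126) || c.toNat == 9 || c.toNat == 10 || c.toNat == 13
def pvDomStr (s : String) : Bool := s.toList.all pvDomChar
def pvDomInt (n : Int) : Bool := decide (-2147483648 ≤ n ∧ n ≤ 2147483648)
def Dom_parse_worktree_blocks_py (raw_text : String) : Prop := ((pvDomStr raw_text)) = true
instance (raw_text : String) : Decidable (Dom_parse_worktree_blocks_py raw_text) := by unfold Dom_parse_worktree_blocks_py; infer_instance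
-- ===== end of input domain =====

-- B restructures A's stateful parse-as-you-go loop into a segment-then-map recursion (alternative decomposition, same cost).

-- shared primitives: Python's blank test `not line.strip()` and `line.partition(" ")`
def pvBlank (l : String) : Bool := PySem.Str.strip l == ""
-- line.partition(" ") used as `key, _, value`: key = chars before the first space, value = chars after it ("" if no space) — exact
def pvPartitionSpace (l : String) : String × String :=
  (String.ofList (l.toList.takeWhile (· ≠ ' ')),
   String.ofList ((l.toList.dropWhile (· ≠ ' ')).drop 1))

-- ===== PORT A =====
def pvStepA (st : List (PySem.Dict String String) × PySem.Dict String String) (line : String) :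
    List (PySem.Dict String String) × PySem.Dict String String :=
  if pvBlank line then
    if st.2.items = [] then st else (st.1 ++ [st.2], PySem.Dict.empty)
  else
    (st.1, st.2.insert (pvPartitionSpace line).1 (pvPartitionSpace line).2)

def parse_worktree_blocks_py (raw_text : String) : List (List (String × String)) :=
  let st := (PySem.Str.splitlines raw_text).foldl pvStepA ([], PySem.Dict.empty)
  (if st.2.items = [] then st.1 else st.1 ++ [st.2]).map PySem.Dict.items

-- ===== PORT B =====
def pvInsLine (d : PySem.Dict String String) (l : String) : PySem.Dict String String :=
  d.insert (pvPartitionSpace l).1 (pvPartitionSpace l).2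

def pvGo : List String → List (List (String × String))
  | [] => []
  | l :: ls =>
    if pvBlank l then pvGo ls
    else
      ((ls.takeWhile (fun x => !pvBlank x)).foldl pvInsLine (pvInsLine PySem.Dict.empty l)).items
        :: pvGo (ls.dropWhile (fun x => !pvBlank x))
termination_by ls => ls.length
decreasing_by
  · simp
  · exact Nat.lt_succ_of_le (List.length_dropWhile_le _ _)

def parse_worktree_blocks_py_alt (raw_text : String) : List (List (String × String)) :=
  pvGo (PySem.Str.splitlines raw_text)

-- ===== PRECONDITION & SPEC =====
def Spec_parse_worktree_blocks_py (raw_text : String) (out : List (List (String × String))) : Prop := out = parse_worktree_blocks_py_alt raw_text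
instance (raw_text : String) (out : List (List (String × String))) : Decidable (Spec_parse_worktree_blocks_py raw_text out) := by unfold Spec_parse_worktree_blocks_py; infer_instance

-- ===== CLAIM (what is proved, stated in full; the proofs are below) =====
def Claim_equal_parse_worktree_blocks_py : Prop := ∀ (raw_text : String), Dom_parse_worktree_blocks_py raw_text → Spec_parse_worktree_blocks_py raw_text (parse_worktree_blocks_py raw_text)

-- ===== LEMMAS AND PROOFS =====

-- generalisation of B's recursion carrying A's pending accumulator dict
def pvG (cur : PySem.Dict String String) (ls : List String) : List (List (String × String)) :=
  let d := (ls.takeWhile (fun x => !pvBlank x)).foldl pvInsLine cur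
  (if d.items = [] then [] else [d.items]) ++ pvGo (ls.dropWhile (fun x => !pvBlank x))

theorem insert_items_ne_nil (d : PySem.Dict String String) (k v : String) :
    (d.insert k v).items ≠ [] := by
  obtain ⟨its⟩ := d
  cases its with
  | nil => simp [PySem.Dict.items_insert]
  | cons p rest => simp [PySem.Dict.items_insert]; split_ifs <;> simp

theorem foldl_ins_ne_nil (ls : List String) (cur : PySem.Dict String String)
    (h : cur.items ≠ []) : (ls.foldl pvInsLine cur).items ≠ [] := by
  induction ls generalizing cur with
  | nil => exact h
  | cons l ls ih => exact ih _ (insert_items_ne_nil _ _ _)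

theorem foldl_stepA_prefix (ls : List String) (b0 : List (PySem.Dict String String))
    (cur : PySem.Dict String String) :
    ls.foldl pvStepA (b0, cur)
      = (b0 ++ (ls.foldl pvStepA ([], cur)).1, (ls.foldl pvStepA ([], cur)).2) := by
  induction ls generalizing b0 cur with
  | nil => simp
  | cons l ls ih =>
    by_cases hb : pvBlank l
    · by_cases hc : cur.items = []
      · have h1 : pvStepA (b0, cur) l = (b0, cur) := by simp [pvStepA, hb, hc]
        have h2 : pvStepA (([] : List (PySem.Dict String String)), cur) l = ([], cur) := by
          simp [pvStepA, hb, hc]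
        rw [List.foldl_cons, List.foldl_cons, h1, h2]
        exact ih b0 cur
      · have h1 : pvStepA (b0, cur) l = (b0 ++ [cur], PySem.Dict.empty) := by
          simp [pvStepA, hb, hc]
        have h2 : pvStepA (([] : List (PySem.Dict String String)), cur) l
            = ([cur], PySem.Dict.empty) := by simp [pvStepA, hb, hc]
        rw [List.foldl_cons, List.foldl_cons, h1, h2, ih (b0 ++ [cur]), ih [cur]]
        simp
    · have h1 : ∀ b : List (PySem.Dict String String),
          pvStepA (b, cur) l = (b, pvInsLine cur l) := by
        intro b; simp [pvStepA, pvInsLine, hb]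
      rw [List.foldl_cons, List.foldl_cons, h1, h1]
      exact ih b0 _

theorem pvGo_eq_pvG (ls : List String) : pvGo ls = pvG PySem.Dict.empty ls := by
  cases ls with
  | nil => simp [pvGo, pvG, PySem.Dict.empty]
  | cons l ls =>
    by_cases hb : pvBlank l
    · have h1 : pvG PySem.Dict.empty (l :: ls) = pvGo (l :: ls) := by
        simp [pvG, hb, PySem.Dict.empty]
      rw [h1]
    · have hne : ((ls.takeWhile (fun x => !pvBlank x)).foldl pvInsLine
          (pvInsLine PySem.Dict.empty l)).items ≠ [] :=
        foldl_ins_ne_nil _ _ (insert_items_ne_nil _ _ _)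
      rw [pvGo]
      simp [pvG, hb, hne]

theorem main_invariant (ls : List String) (cur : PySem.Dict String String) :
    (if (ls.foldl pvStepA ([], cur)).2.items = [] then (ls.foldl pvStepA ([], cur)).1
      else (ls.foldl pvStepA ([], cur)).1 ++ [(ls.foldl pvStepA ([], cur)).2]).map
        PySem.Dict.items = pvG cur ls := by
  induction ls generalizing cur with
  | nil =>
    simp only [List.foldl_nil, pvG, List.takeWhile_nil, List.dropWhile_nil, pvGo,
      List.append_nil]
    split_ifs <;> simp
  | cons l ls ih =>
    by_cases hb : pvBlank l
    · by_cases hc : cur.items = []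
      · have h2 : pvStepA (([] : List (PySem.Dict String String)), cur) l = ([], cur) := by
          simp [pvStepA, hb, hc]
        rw [List.foldl_cons, h2, ih cur]
        have hcur : cur = PySem.Dict.empty := by
          apply PySem.Dict.ext; simp [hc, PySem.Dict.empty]
        subst hcur
        rw [← pvGo_eq_pvG, ← pvGo_eq_pvG]
        conv_rhs => rw [pvGo]
        simp [hb]
      · have h2 : pvStepA (([] : List (PySem.Dict String String)), cur) l
            = ([cur], PySem.Dict.empty) := by simp [pvStepA, hb, hc]
        rw [List.foldl_cons, h2, foldl_stepA_prefix ls [cur] PySem.Dict.empty]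
        have lhs : (if (ls.foldl pvStepA ([], PySem.Dict.empty)).2.items = []
              then [cur] ++ (ls.foldl pvStepA ([], PySem.Dict.empty)).1
              else [cur] ++ (ls.foldl pvStepA ([], PySem.Dict.empty)).1
                ++ [(ls.foldl pvStepA ([], PySem.Dict.empty)).2]).map PySem.Dict.items
            = cur.items :: (if (ls.foldl pvStepA ([], PySem.Dict.empty)).2.items = []
              then (ls.foldl pvStepA ([], PySem.Dict.empty)).1
              else (ls.foldl pvStepA ([], PySem.Dict.empty)).1
                ++ [(ls.foldl pvStepA ([], PySem.Dict.empty)).2]).map PySem.Dict.items := by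
          split_ifs <;> simp
        rw [lhs, ih PySem.Dict.empty, ← pvGo_eq_pvG]
        have hrhs : pvG cur (l :: ls) = cur.items :: pvGo (l :: ls) := by
          simp [pvG, hb, hc]
        rw [hrhs]
        conv_rhs => rw [pvGo]
        simp [hb]
    · have h2 : pvStepA (([] : List (PySem.Dict String String)), cur) l
          = ([], pvInsLine cur l) := by simp [pvStepA, pvInsLine, hb]
      rw [List.foldl_cons, h2, ih (pvInsLine cur l)]
      simp [pvG, hb, pvInsLine]

-- ===== VERDICT (by name: the statement is the Claim_ definition above) =====
theorem parse_worktree_blocks_py_spec : Claim_equal_parse_worktree_blocks_py := by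
  intro raw_text _
  unfold Spec_parse_worktree_blocks_py parse_worktree_blocks_py parse_worktree_blocks_py_alt
  rw [pvGo_eq_pvG]
  exact main_invariant _ _
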